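-- pv_equiv track=rewrite | github.com/GuideOS/guideos-conky | files/conky/hwinfo.py | shorten_gpu_name
-- ===== SOURCE A (Python) =====
-- def shorten_gpu_name(model, manufacturer):
--     model_lower = model.lower()
--
--     if manufacturer == "Intel":
--         if "2nd generation core processor family" in model_lower:
--             return "Intel 2nd Gen integrated"
--         elif "3rd generation core processor family" in model_lower:
--             return "Intel 3rd Gen integrated"
--         elif "4th generation core processor family" in model_lower:
--             return "Intel 4th Gen integrated"
--         elif any(x in model_lower for x in ["uhd graphics", "hd graphics"]):
--             if "11th" in model_lower or "12th" in model_lower or "13th" in model_lower: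
--                 return "Intel 11th+ Gen iGPU"
--             elif "iris" in model_lower:
--                 return "Intel Iris Xe"
--             elif "10th" in model_lower:
--                 return "Intel 10th Gen iGPU"
--             else:
--                 return "Intel HD/UHD"
--         elif "xeon" in model_lower:
--             return "Intel Xeon iGPU"
--
--     elif manufacturer == "AMD":
--         if "radeon" in model_lower and "rx" not in model_lower:
--             if "ryzen" in model_lower or "zen" in model_lower:
--                 return "AMD Ryzen APU"
--             elif "athlon" in model_lower:
--                 return "AMD Athlon APU"
--             else:
--                 return "AMD iGPU"
--         elif any(x in model_lower for x in ["integrated graphics", "family graphics"]):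
--             return "AMD integrated"
--
--     return f"{manufacturer} {model}"
-- ===== SOURCE B (Python) =====
-- # Two-stage design: (1) one pass over a marker table extracts boolean features
-- # of the lowered model string into a dict; (2) a generic matcher resolves the
-- # feature dict against per-manufacturer rules with required/forbidden tags.
-- # Redundant substrings are collapsed: "ryzen" contains "zen" and
-- # "uhd graphics" contains "hd graphics", so one marker covers each pair.
-- MARKERS = [
--     ("2nd generation core processor family", "gen2"),
--     ("3rd generation core processor family", "gen3"),
--     ("4th generation core processor family", "gen4"),
--     ("hd graphics", "hd"),
--     ("11th", "new"), ("12th", "new"), ("13th", "new"),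
--     ("iris", "iris"),
--     ("10th", "g10"),
--     ("xeon", "xeon"),
--     ("radeon", "radeon"),
--     ("rx", "rx"),
--     ("zen", "zen"),
--     ("athlon", "athlon"),
--     ("integrated graphics", "integ"), ("family graphics", "integ"),
-- ]
--
-- RULES = {
--     "Intel": [
--         (("gen2",), (), "Intel 2nd Gen integrated"),
--         (("gen3",), (), "Intel 3rd Gen integrated"),
--         (("gen4",), (), "Intel 4th Gen integrated"),
--         (("hd", "new"), (), "Intel 11th+ Gen iGPU"),
--         (("hd", "iris"), (), "Intel Iris Xe"),
--         (("hd", "g10"), (), "Intel 10th Gen iGPU"),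
--         (("hd",), (), "Intel HD/UHD"),
--         (("xeon",), (), "Intel Xeon iGPU"),
--     ],
--     "AMD": [
--         (("radeon", "zen"), ("rx",), "AMD Ryzen APU"),
--         (("radeon", "athlon"), ("rx",), "AMD Athlon APU"),
--         (("radeon",), ("rx",), "AMD iGPU"),
--         (("integ",), (), "AMD integrated"),
--     ],
-- }
--
-- def shorten_gpu_name(model, manufacturer):
--     m = model.lower()
--     feats = {}
--     for sub, tag in MARKERS:
--         feats[tag] = feats.get(tag, False) or (sub in m)
--     for need, forbid, label in RULES.get(manufacturer, []):
--         if all(feats[t] for t in need) and not any(feats[t] for t in forbid):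
--             return label
--     return f"{manufacturer} {model}"
-- ===== Notes on version B (the rewrite author's own statement) =====
-- stated objective: alternative
-- what changed: Replaces A's nested if/elif tree with a two-stage pipeline: one pass over a marker table extracts boolean features of the lowered model into a dict (collapsing redundant substrings, since 'ryzen' contains 'zen' and 'uhd graphics' contains 'hd graphics'), then a generic matcher resolves the feature dict against declarative per-manufacturer rules with required/forbidden tag sets, first match wins.
import Mathlib
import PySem

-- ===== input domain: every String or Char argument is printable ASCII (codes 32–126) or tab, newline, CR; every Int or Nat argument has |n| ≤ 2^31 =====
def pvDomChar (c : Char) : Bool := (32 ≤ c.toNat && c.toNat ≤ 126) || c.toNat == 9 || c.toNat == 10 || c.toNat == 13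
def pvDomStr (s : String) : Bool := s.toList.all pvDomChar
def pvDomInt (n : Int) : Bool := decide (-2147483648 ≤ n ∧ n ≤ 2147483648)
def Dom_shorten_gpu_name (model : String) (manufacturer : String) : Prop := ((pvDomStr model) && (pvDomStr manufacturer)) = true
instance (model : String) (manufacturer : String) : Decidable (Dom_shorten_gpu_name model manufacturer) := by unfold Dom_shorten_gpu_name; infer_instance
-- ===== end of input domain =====

-- B replaces A's nested if/elif tree with a two-stage design: a marker-table pass extracting a feature dict from the lowered model, then a generic matcher over per-manufacturer rules with required/forbidden tags (redundant substrings collapsed: "ryzen" contains "zen", "uhd graphics" contains "hd graphics"); alternative structure, same cost.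


-- ===== PORT A =====
def shorten_gpu_name (model : String) (manufacturer : String) : String :=
  let model_lower := PySem.Str.lower model
  if manufacturer == "Intel" then
    if PySem.Str.isIn "2nd generation core processor family" model_lower then
      "Intel 2nd Gen integrated"
    else if PySem.Str.isIn "3rd generation core processor family" model_lower then
      "Intel 3rd Gen integrated"
    else if PySem.Str.isIn "4th generation core processor family" model_lower then
      "Intel 4th Gen integrated"
    else if PySem.Str.isIn "uhd graphics" model_lower || PySem.Str.isIn "hd graphics" model_lower then
      if PySem.Str.isIn "11th" model_lower || PySem.Str.isIn "12th" model_lower || PySem.Str.isIn "13th" model_lower then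
        "Intel 11th+ Gen iGPU"
      else if PySem.Str.isIn "iris" model_lower then
        "Intel Iris Xe"
      else if PySem.Str.isIn "10th" model_lower then
        "Intel 10th Gen iGPU"
      else
        "Intel HD/UHD"
    else if PySem.Str.isIn "xeon" model_lower then
      "Intel Xeon iGPU"
    else
      manufacturer ++ " " ++ model
  else if manufacturer == "AMD" then
    if PySem.Str.isIn "radeon" model_lower && !(PySem.Str.isIn "rx" model_lower) then
      if PySem.Str.isIn "ryzen" model_lower || PySem.Str.isIn "zen" model_lower then
        "AMD Ryzen APU"
      else if PySem.Str.isIn "athlon" model_lower then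
        "AMD Athlon APU"
      else
        "AMD iGPU"
    else if PySem.Str.isIn "integrated graphics" model_lower || PySem.Str.isIn "family graphics" model_lower then
      "AMD integrated"
    else
      manufacturer ++ " " ++ model
  else
    manufacturer ++ " " ++ model

-- ===== PORT B =====
-- stage-1 marker table: substring → feature tag
def pvMarkers : List (String × String) := [
  ("2nd generation core processor family", "gen2"),
  ("3rd generation core processor family", "gen3"),
  ("4th generation core processor family", "gen4"),
  ("hd graphics", "hd"),
  ("11th", "new"), ("12th", "new"), ("13th", "new"),
  ("iris", "iris"),
  ("10th", "g10"),
  ("xeon", "xeon"),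
  ("radeon", "radeon"),
  ("rx", "rx"),
  ("zen", "zen"),
  ("athlon", "athlon"),
  ("integrated graphics", "integ"), ("family graphics", "integ")]

-- stage-2 rule tables: manufacturer → list of (required tags, forbidden tags, label)
def pvRules : PySem.Dict String (List (List String × List String × String)) := PySem.Dict.ofList [
  ("Intel", [
    (["gen2"], [], "Intel 2nd Gen integrated"),
    (["gen3"], [], "Intel 3rd Gen integrated"),
    (["gen4"], [], "Intel 4th Gen integrated"),
    (["hd", "new"], [], "Intel 11th+ Gen iGPU"),
    (["hd", "iris"], [], "Intel Iris Xe"),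
    (["hd", "g10"], [], "Intel 10th Gen iGPU"),
    (["hd"], [], "Intel HD/UHD"),
    (["xeon"], [], "Intel Xeon iGPU")]),
  ("AMD", [
    (["radeon", "zen"], ["rx"], "AMD Ryzen APU"),
    (["radeon", "athlon"], ["rx"], "AMD Athlon APU"),
    (["radeon"], ["rx"], "AMD iGPU"),
    (["integ"], [], "AMD integrated")])]

-- the matcher loop: first rule whose required tags all hold and forbidden tags all fail
def pvMatch (feats : PySem.Dict String Bool) (rules : List (List String × List String × String)) (dflt : String) : String :=
  match rules with
  | [] => dflt
  | (need, forbid, label) :: rest =>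
    if need.all (fun t => feats.getD t false) && !(forbid.any (fun t => feats.getD t false)) then label
    else pvMatch feats rest dflt

def shorten_gpu_name_alt (model : String) (manufacturer : String) : String :=
  let m := PySem.Str.lower model
  let feats := pvMarkers.foldl
    (fun feats st => feats.insert st.2 (feats.getD st.2 false || PySem.Str.isIn st.1 m))
    PySem.Dict.empty
  -- feats[t] in Python: every tag queried by pvRules is a key of feats, so getD is exact here
  pvMatch feats (pvRules.getD manufacturer []) (manufacturer ++ " " ++ model)

-- ===== PRECONDITION & SPEC =====
def Spec_shorten_gpu_name (model : String) (manufacturer : String) (out : String) : Prop := out = shorten_gpu_name_alt model manufacturer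
instance (model : String) (manufacturer : String) (out : String) : Decidable (Spec_shorten_gpu_name model manufacturer out) := by unfold Spec_shorten_gpu_name; infer_instance

-- ===== CLAIM =====
def Claim_equal_shorten_gpu_name : Prop := ∀ (model : String) (manufacturer : String), Dom_shorten_gpu_name model manufacturer → Spec_shorten_gpu_name model manufacturer (shorten_gpu_name model manufacturer)

-- ===== LEMMAS AND PROOFS =====
-- "hd graphics" is a substring of "uhd graphics", so one marker covers both A-tests
theorem pv_uhd_imp_hd (m : String) (h : PySem.Str.isIn "uhd graphics" m = true) :
    PySem.Str.isIn "hd graphics" m = true := by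
  rw [PySem.Str.isIn_iff_infix] at h ⊢
  exact List.IsInfix.trans (by decide) h

theorem pv_or_hd (m : String) :
    (PySem.Str.isIn "uhd graphics" m || PySem.Str.isIn "hd graphics" m) = PySem.Str.isIn "hd graphics" m := by
  cases hu : PySem.Str.isIn "uhd graphics" m
  · simp
  · simp only [pv_uhd_imp_hd m hu, Bool.true_or]

-- "zen" is a substring of "ryzen"
theorem pv_ryzen_imp_zen (m : String) (h : PySem.Str.isIn "ryzen" m = true) :
    PySem.Str.isIn "zen" m = true := by
  rw [PySem.Str.isIn_iff_infix] at h ⊢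
  exact List.IsInfix.trans (by decide) h

theorem pv_or_zen (m : String) :
    (PySem.Str.isIn "ryzen" m || PySem.Str.isIn "zen" m) = PySem.Str.isIn "zen" m := by
  cases hr : PySem.Str.isIn "ryzen" m
  · simp
  · simp only [pv_ryzen_imp_zen m hr, Bool.true_or]

-- boolean-level agreement of A's Intel branch with the matcher on the feature dict
theorem pv_intel_eq (b2 b3 b4 uhd hd nw ir b10 xe ra rx _ry zn at_ i1 i2 : Bool) (dflt : String)
    (hor : (uhd || hd) = hd) :
    (if b2 then "Intel 2nd Gen integrated"
     else if b3 then "Intel 3rd Gen integrated"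
     else if b4 then "Intel 4th Gen integrated"
     else if uhd || hd then
       if nw then "Intel 11th+ Gen iGPU"
       else if ir then "Intel Iris Xe"
       else if b10 then "Intel 10th Gen iGPU"
       else "Intel HD/UHD"
     else if xe then "Intel Xeon iGPU"
     else dflt) =
    pvMatch (PySem.Dict.mk [("gen2", b2), ("gen3", b3), ("gen4", b4), ("hd", hd), ("new", nw),
        ("iris", ir), ("g10", b10), ("xeon", xe), ("radeon", ra), ("rx", rx), ("zen", zn),
        ("athlon", at_), ("integ", i1 || i2)])
      [(["gen2"], [], "Intel 2nd Gen integrated"),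
       (["gen3"], [], "Intel 3rd Gen integrated"),
       (["gen4"], [], "Intel 4th Gen integrated"),
       (["hd", "new"], [], "Intel 11th+ Gen iGPU"),
       (["hd", "iris"], [], "Intel Iris Xe"),
       (["hd", "g10"], [], "Intel 10th Gen iGPU"),
       (["hd"], [], "Intel HD/UHD"),
       (["xeon"], [], "Intel Xeon iGPU")] dflt := by
  rw [hor]
  cases b2 <;> cases b3 <;> cases b4 <;> cases hd <;> cases nw <;> cases ir <;> cases b10 <;> cases xe <;> rfl

-- boolean-level agreement of A's AMD branch with the matcher on the feature dict
theorem pv_amd_eq (b2 b3 b4 hd nw ir b10 xe ra rx ry zn at_ i1 i2 : Bool) (dflt : String)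
    (hor : (ry || zn) = zn) :
    (if ra && !rx then
       if ry || zn then "AMD Ryzen APU"
       else if at_ then "AMD Athlon APU"
       else "AMD iGPU"
     else if i1 || i2 then "AMD integrated"
     else dflt) =
    pvMatch (PySem.Dict.mk [("gen2", b2), ("gen3", b3), ("gen4", b4), ("hd", hd), ("new", nw),
        ("iris", ir), ("g10", b10), ("xeon", xe), ("radeon", ra), ("rx", rx), ("zen", zn),
        ("athlon", at_), ("integ", i1 || i2)])
      [(["radeon", "zen"], ["rx"], "AMD Ryzen APU"),
       (["radeon", "athlon"], ["rx"], "AMD Athlon APU"),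
       (["radeon"], ["rx"], "AMD iGPU"),
       (["integ"], [], "AMD integrated")] dflt := by
  rw [hor]
  cases ra <;> cases rx <;> cases zn <;> cases at_ <;> cases i1 <;> cases i2 <;> rfl

-- the marker-table fold evaluates to this literal feature dict
theorem pv_feats_eq (mm : String) :
    List.foldl (fun (feats : PySem.Dict String Bool) (st : String × String) =>
        feats.insert st.2 (feats.getD st.2 false || PySem.Str.isIn st.1 mm))
      PySem.Dict.empty pvMarkers = PySem.Dict.mk [
      ("gen2", PySem.Str.isIn "2nd generation core processor family" mm),
      ("gen3", PySem.Str.isIn "3rd generation core processor family" mm),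
      ("gen4", PySem.Str.isIn "4th generation core processor family" mm),
      ("hd", PySem.Str.isIn "hd graphics" mm),
      ("new", PySem.Str.isIn "11th" mm || PySem.Str.isIn "12th" mm || PySem.Str.isIn "13th" mm),
      ("iris", PySem.Str.isIn "iris" mm),
      ("g10", PySem.Str.isIn "10th" mm),
      ("xeon", PySem.Str.isIn "xeon" mm),
      ("radeon", PySem.Str.isIn "radeon" mm),
      ("rx", PySem.Str.isIn "rx" mm),
      ("zen", PySem.Str.isIn "zen" mm),
      ("athlon", PySem.Str.isIn "athlon" mm),
      ("integ", PySem.Str.isIn "integrated graphics" mm || PySem.Str.isIn "family graphics" mm)] := by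
  simp [pvMarkers, PySem.Dict.insert, PySem.Dict.getD, PySem.Dict.get?, PySem.Dict.empty]

theorem pv_rules_intel : pvRules.getD "Intel" [] =
    [(["gen2"], [], "Intel 2nd Gen integrated"),
     (["gen3"], [], "Intel 3rd Gen integrated"),
     (["gen4"], [], "Intel 4th Gen integrated"),
     (["hd", "new"], [], "Intel 11th+ Gen iGPU"),
     (["hd", "iris"], [], "Intel Iris Xe"),
     (["hd", "g10"], [], "Intel 10th Gen iGPU"),
     (["hd"], [], "Intel HD/UHD"),
     (["xeon"], [], "Intel Xeon iGPU")] := by rfl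

theorem pv_rules_amd : pvRules.getD "AMD" [] =
    [(["radeon", "zen"], ["rx"], "AMD Ryzen APU"),
     (["radeon", "athlon"], ["rx"], "AMD Athlon APU"),
     (["radeon"], ["rx"], "AMD iGPU"),
     (["integ"], [], "AMD integrated")] := by rfl

-- ===== VERDICT =====
set_option maxHeartbeats 4000000 in
theorem shorten_gpu_name_spec : Claim_equal_shorten_gpu_name := by
  intro model manufacturer _
  unfold Spec_shorten_gpu_name shorten_gpu_name shorten_gpu_name_alt
  by_cases h1 : manufacturer = "Intel"
  · subst h1
    simp only [pv_feats_eq, pv_rules_intel]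
    exact pv_intel_eq
      (PySem.Str.isIn "2nd generation core processor family" (PySem.Str.lower model))
      (PySem.Str.isIn "3rd generation core processor family" (PySem.Str.lower model))
      (PySem.Str.isIn "4th generation core processor family" (PySem.Str.lower model))
      (PySem.Str.isIn "uhd graphics" (PySem.Str.lower model))
      (PySem.Str.isIn "hd graphics" (PySem.Str.lower model))
      (PySem.Str.isIn "11th" (PySem.Str.lower model) || PySem.Str.isIn "12th" (PySem.Str.lower model) || PySem.Str.isIn "13th" (PySem.Str.lower model))
      (PySem.Str.isIn "iris" (PySem.Str.lower model))
      (PySem.Str.isIn "10th" (PySem.Str.lower model))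
      (PySem.Str.isIn "xeon" (PySem.Str.lower model))
      (PySem.Str.isIn "radeon" (PySem.Str.lower model))
      (PySem.Str.isIn "rx" (PySem.Str.lower model))
      (PySem.Str.isIn "ryzen" (PySem.Str.lower model))
      (PySem.Str.isIn "zen" (PySem.Str.lower model))
      (PySem.Str.isIn "athlon" (PySem.Str.lower model))
      (PySem.Str.isIn "integrated graphics" (PySem.Str.lower model))
      (PySem.Str.isIn "family graphics" (PySem.Str.lower model))
      ("Intel" ++ " " ++ model)
      (pv_or_hd (PySem.Str.lower model))
  · by_cases h2 : manufacturer = "AMD"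
    · subst h2
      have e1 : (("AMD" : String) == "Intel") = false := by decide
      simp only [pv_feats_eq, pv_rules_amd, e1, Bool.false_eq_true, if_false, beq_self_eq_true, if_true]
      exact pv_amd_eq
        (PySem.Str.isIn "2nd generation core processor family" (PySem.Str.lower model))
        (PySem.Str.isIn "3rd generation core processor family" (PySem.Str.lower model))
        (PySem.Str.isIn "4th generation core processor family" (PySem.Str.lower model))
        (PySem.Str.isIn "hd graphics" (PySem.Str.lower model))
        (PySem.Str.isIn "11th" (PySem.Str.lower model) || PySem.Str.isIn "12th" (PySem.Str.lower model) || PySem.Str.isIn "13th" (PySem.Str.lower model))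
        (PySem.Str.isIn "iris" (PySem.Str.lower model))
        (PySem.Str.isIn "10th" (PySem.Str.lower model))
        (PySem.Str.isIn "xeon" (PySem.Str.lower model))
        (PySem.Str.isIn "radeon" (PySem.Str.lower model))
        (PySem.Str.isIn "rx" (PySem.Str.lower model))
        (PySem.Str.isIn "ryzen" (PySem.Str.lower model))
        (PySem.Str.isIn "zen" (PySem.Str.lower model))
        (PySem.Str.isIn "athlon" (PySem.Str.lower model))
        (PySem.Str.isIn "integrated graphics" (PySem.Str.lower model))
        (PySem.Str.isIn "family graphics" (PySem.Str.lower model))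
        ("AMD" ++ " " ++ model)
        (pv_or_zen (PySem.Str.lower model))
    · have e1 : (manufacturer == "Intel") = false := by simpa using h1
      have e2 : (manufacturer == "AMD") = false := by simpa using h2
      have e1' : (("Intel" : String) == manufacturer) = false := by
        rw [beq_eq_false_iff_ne]; exact fun h => h1 h.symm
      have e2' : (("AMD" : String) == manufacturer) = false := by
        rw [beq_eq_false_iff_ne]; exact fun h => h2 h.symm
      simp [pvMatch, pvRules, e1, e2, e1', e2', PySem.Dict.getD, PySem.Dict.get?, PySem.Dict.ofList,
        PySem.Dict.update, PySem.Dict.empty, PySem.Dict.insert, PySem.Dict.contains, List.find?]
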